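-- pv_equiv track=rewrite | github.com/qcm0224/SimpleLatexVisualize | main.py | preprocess_latex
-- ===== SOURCE A (Python) =====
-- def preprocess_latex(latex):
--     """Preprocess LaTeX code, remove or replace unsupported commands"""
--     # Remove all environments
--     environments = ['align', 'cases', 'pmatrix', 'bmatrix', 'vmatrix', 'matrix', 'array', 'eqnarray', 'gather', 'split']
--     for env in environments:
--         # Remove \begin{env} and \end{env}
--         latex = latex.replace(f'\\begin{{{env}}}', '')
--         latex = latex.replace(f'\\end{{{env}}}', '')
--
--     # Replace commands
--     replacements = {
--         '\\mathbf{': '\\text{',  # Replace bold with plain text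
--         '\\boldsymbol{': '\\text{',  # Replace bold symbols with plain text
--         '\\displaystyle': '',  # Remove display style command
--         '\\substack{': '',  # Remove subscript stacking
--         '\\\\': ',',  # Replace newline with comma
--         '&': ' ',  # Remove alignment symbol
--     }
--
--     for old, new in replacements.items():
--         latex = latex.replace(old, new)
--
--     return latex
-- ===== SOURCE B (Python) =====
-- def preprocess_latex(latex):
--     """Preprocess LaTeX code, remove or replace unsupported commands"""
--     envs = ['align', 'cases', 'pmatrix', 'bmatrix', 'vmatrix', 'matrix',
--             'array', 'eqnarray', 'gather', 'split']
--     # one flat, ordered rule table: interleaved \begin/\end deletions, then the command rewrites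
--     rules = [r for e in envs for r in (('\\begin{%s}' % e, ''), ('\\end{%s}' % e, ''))]
--     rules += [('\\mathbf{', '\\text{'),
--               ('\\boldsymbol{', '\\text{'),
--               ('\\displaystyle', ''),
--               ('\\substack{', ''),
--               ('\\\\', ','),
--               ('&', ' ')]
--
--     def apply(s, rs):
--         if not rs:
--             return s
--         old, new = rs[0]
--         return apply(new.join(s.split(old)), rs[1:])
--
--     return apply(latex, rules)
-- ===== Notes on version B (the rewrite author's own statement) =====
-- stated objective: alternative
-- what changed: A's two imperative loops (f-string env loop of str.replace calls, then a dict loop) become a single flat ordered rule table consumed by a recursive helper that performs each substitution as new.join(s.split(old)) instead of str.replace.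
import Mathlib
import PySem

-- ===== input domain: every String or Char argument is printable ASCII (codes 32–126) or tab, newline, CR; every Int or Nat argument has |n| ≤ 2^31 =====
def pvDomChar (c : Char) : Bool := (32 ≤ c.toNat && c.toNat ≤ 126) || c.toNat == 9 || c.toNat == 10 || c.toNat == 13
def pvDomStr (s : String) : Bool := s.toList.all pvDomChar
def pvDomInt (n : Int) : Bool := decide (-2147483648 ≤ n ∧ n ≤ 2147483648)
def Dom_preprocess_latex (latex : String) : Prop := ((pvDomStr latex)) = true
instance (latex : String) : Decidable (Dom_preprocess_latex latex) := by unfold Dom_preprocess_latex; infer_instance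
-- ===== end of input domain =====

-- B replaces A's two imperative replace-loops by one flat ordered rule table consumed
-- recursively, doing each substitution as new.join(s.split(old)); same cost, same values.


-- ===== PORT A =====
def preprocess_latex (latex : String) : String :=
  let environments : List String :=
    ["align", "cases", "pmatrix", "bmatrix", "vmatrix", "matrix", "array", "eqnarray", "gather", "split"]
  let latex := environments.foldl (fun latex env =>
    let latex := PySem.Str.replace latex ("\\begin{" ++ env ++ "}") ""
    let latex := PySem.Str.replace latex ("\\end{" ++ env ++ "}") ""
    latex) latex
  let replacements : List (String × String) :=
    [("\\mathbf{", "\\text{"), ("\\boldsymbol{", "\\text{"), ("\\displaystyle", ""),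
     ("\\substack{", ""), ("\\\\", ","), ("&", " ")]
  let latex := replacements.foldl (fun latex p => PySem.Str.replace latex p.1 p.2) latex
  latex

-- ===== PORT B =====
-- `new.join(s.split(old))`; split? is none only for old = "" and every rule's old is a
-- nonempty literal, so the getD default is never reached.
def pvApply : String → List (String × String) → String
  | s, [] => s
  | s, (old, new) :: rs => pvApply (PySem.Str.join new ((PySem.Str.split? s old).getD [s])) rs

def preprocess_latex_alt (latex : String) : String :=
  let envs : List String :=
    ["align", "cases", "pmatrix", "bmatrix", "vmatrix", "matrix", "array", "eqnarray", "gather", "split"]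
  let rules : List (String × String) :=
    envs.flatMap (fun e => [("\\begin{" ++ e ++ "}", ""), ("\\end{" ++ e ++ "}", "")])
    ++ [("\\mathbf{", "\\text{"), ("\\boldsymbol{", "\\text{"), ("\\displaystyle", ""),
        ("\\substack{", ""), ("\\\\", ","), ("&", " ")]
  pvApply latex rules

-- ===== PRECONDITION & SPEC =====
def Spec_preprocess_latex (latex : String) (out : String) : Prop := out = preprocess_latex_alt latex
instance (latex : String) (out : String) : Decidable (Spec_preprocess_latex latex out) := by unfold Spec_preprocess_latex; infer_instance

-- ===== CLAIM (what is proved, stated in full; the proofs are below) =====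
def Claim_equal_preprocess_latex : Prop := ∀ (latex : String), Dom_preprocess_latex latex → Spec_preprocess_latex latex (preprocess_latex latex)

-- ===== LEMMAS AND PROOFS =====

-- replace.go: the accumulator can be pulled out front
lemma replaceGo_acc (old nw : List Char) (fuel : Nat) :
    ∀ (l acc : List Char),
      PySem.Chars.replace.go old nw fuel l acc = acc.reverse ++ PySem.Chars.replace.go old nw fuel l [] := by
  induction fuel with
  | zero => intro l acc; simp [PySem.Chars.replace.go]
  | succ f ih =>
    intro l acc
    cases l with
    | nil => simp [PySem.Chars.replace.go]
    | cons c t =>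
      simp only [PySem.Chars.replace.go]
      split_ifs with h
      · rw [ih _ (nw.reverse ++ acc), ih _ (nw.reverse ++ [])]; simp
      · rw [ih t (c :: acc), ih t [c]]; simp

-- splitOn.go: the accumulator of finished parts can be pulled out front
lemma splitGo_acc (sep : List Char) (fuel : Nat) :
    ∀ (l cur : List Char) (acc : List (List Char)),
      PySem.Chars.splitOn.go sep fuel l cur acc = acc.reverse ++ PySem.Chars.splitOn.go sep fuel l cur [] := by
  induction fuel with
  | zero => intro l cur acc; simp [PySem.Chars.splitOn.go]
  | succ f ih =>
    intro l cur acc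
    cases l with
    | nil => simp [PySem.Chars.splitOn.go]
    | cons c t =>
      simp only [PySem.Chars.splitOn.go]
      split_ifs with h
      · rw [ih _ [] (cur.reverse :: acc), ih _ [] [cur.reverse]]; simp
      · exact ih t (c :: cur) acc

-- splitOn.go never returns the empty list of parts
lemma splitGo_ne_nil (sep : List Char) (fuel : Nat) :
    ∀ (l cur : List Char) (acc : List (List Char)),
      PySem.Chars.splitOn.go sep fuel l cur acc ≠ [] := by
  induction fuel with
  | zero => intro l cur acc; simp [PySem.Chars.splitOn.go]
  | succ f ih =>
    intro l cur acc
    cases l with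
    | nil => simp [PySem.Chars.splitOn.go]
    | cons c t =>
      simp only [PySem.Chars.splitOn.go]
      split_ifs with h
      · exact ih _ [] _
      · exact ih t (c :: cur) acc

lemma join_cons_ne_nil (nw x : List Char) (parts : List (List Char)) (h : parts ≠ []) :
    PySem.Chars.join nw (x :: parts) = x ++ nw ++ PySem.Chars.join nw parts := by
  cases parts with
  | nil => exact absurd rfl h
  | cons b t => simp [PySem.Chars.join, List.intercalate]

-- the heart: joining the split parts with `nw` replays the replace scanner
lemma join_splitGo (old nw : List Char) (hold : old ≠ []) (fuel : Nat) :
    ∀ (l cur : List Char), l.length ≤ fuel →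
      PySem.Chars.join nw (PySem.Chars.splitOn.go old fuel l cur []) =
        cur.reverse ++ PySem.Chars.replace.go old nw fuel l [] := by
  induction fuel with
  | zero =>
    intro l cur hl
    have : l = [] := List.length_eq_zero_iff.mp (Nat.le_zero.mp hl)
    subst this
    simp [PySem.Chars.splitOn.go, PySem.Chars.replace.go, PySem.Chars.join, List.intercalate]
  | succ f ih =>
    intro l cur hl
    cases l with
    | nil => simp [PySem.Chars.splitOn.go, PySem.Chars.replace.go, PySem.Chars.join, List.intercalate]
    | cons c t =>
      simp only [PySem.Chars.splitOn.go, PySem.Chars.replace.go]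
      split_ifs with h
      · have hlen : (List.drop old.length (c :: t)).length ≤ f := by
          have : 1 ≤ old.length := by
            cases old with
            | nil => exact absurd rfl hold
            | cons _ _ => simp
          simp only [List.length_drop, List.length_cons] at *
          omega
        rw [splitGo_acc old f _ [] [cur.reverse]]
        simp only [List.reverse_cons, List.reverse_nil, List.nil_append, List.singleton_append]
        rw [join_cons_ne_nil nw cur.reverse _ (splitGo_ne_nil old f _ [] []),
            ih _ [] hlen,
            replaceGo_acc old nw f _ (nw.reverse ++ [])]
        simp
      · have hlen : t.length ≤ f := by simp only [List.length_cons] at hl; omega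
        rw [ih t (c :: cur) hlen, replaceGo_acc old nw f t [c]]
        simp

-- replace.go ignores the exact fuel once it covers the input length
lemma replaceGo_fuel (old nw : List Char) (hold : old ≠ []) :
    ∀ (f1 f2 : Nat) (l : List Char), l.length ≤ f1 → l.length ≤ f2 →
      PySem.Chars.replace.go old nw f1 l [] = PySem.Chars.replace.go old nw f2 l [] := by
  intro f1
  induction f1 with
  | zero =>
    intro f2 l h1 h2
    have : l = [] := List.length_eq_zero_iff.mp (Nat.le_zero.mp h1)
    subst this
    cases f2 <;> simp [PySem.Chars.replace.go]
  | succ f ih =>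
    intro f2 l h1 h2
    cases l with
    | nil => cases f2 <;> simp [PySem.Chars.replace.go]
    | cons c t =>
      cases f2 with
      | zero => simp at h2
      | succ g =>
        simp only [List.length_cons] at h1 h2
        have hone : 1 ≤ old.length := by
          cases old with
          | nil => exact absurd rfl hold
          | cons _ _ => simp
        have hc : (List.drop old.length (c :: t)).length ≤ t.length := by
          simp only [List.length_drop, List.length_cons]; omega
        simp only [PySem.Chars.replace.go]
        split_ifs with h
        · rw [replaceGo_acc old nw f _ _, replaceGo_acc old nw g _ _]
          rw [ih g _ (by omega) (by omega)]
        · rw [replaceGo_acc old nw f t [c], replaceGo_acc old nw g t [c]]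
          rw [ih g t (by omega) (by omega)]

lemma join_splitOn_chars (s old nw : List Char) (h : old ≠ []) :
    PySem.Chars.join nw (PySem.Chars.splitOn s old) = PySem.Chars.replace s old nw := by
  unfold PySem.Chars.splitOn PySem.Chars.replace
  rw [if_neg (by simpa [List.isEmpty_iff] using h)]
  rw [join_splitGo old nw h (s.length + 1) s [] (by omega)]
  simp [replaceGo_fuel old nw h (s.length + 1) s.length s (by omega) (by omega)]

-- String level: new.join(s.split(old)) = s.replace(old, new) for nonempty old
lemma str_splitjoin (s old nw : String) (h : old.toList ≠ []) :
    PySem.Str.join nw ((PySem.Str.split? s old).getD [s]) = PySem.Str.replace s old nw := by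
  unfold PySem.Str.split? PySem.Chars.split? PySem.Str.join PySem.Str.replace
  rw [if_neg (by simpa [List.isEmpty_iff] using h)]
  rw [← join_splitOn_chars s.toList old.toList nw.toList h]
  congr 1
  simp [List.map_map, Function.comp_def, String.toList_ofList]

-- one rule of B's table is exactly one str.replace pass
lemma pvApply_cons (s old nw : String) (rs : List (String × String)) (h : old.toList ≠ []) :
    pvApply s ((old, nw) :: rs) = pvApply (PySem.Str.replace s old nw) rs := by
  simp [pvApply, str_splitjoin s old nw h]

-- ===== VERDICT (by name: the statement is the Claim_ definition above) =====
theorem preprocess_latex_spec : Claim_equal_preprocess_latex := by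
  intro latex _
  show preprocess_latex latex = preprocess_latex_alt latex
  simp only [preprocess_latex, preprocess_latex_alt, List.flatMap_cons, List.flatMap_nil,
    List.cons_append, List.nil_append, List.append_nil, List.foldl_cons, List.foldl_nil]
  repeat rw [pvApply_cons _ _ _ _ (by decide)]
  rfl
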